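-- pv_equiv track=rewrite | github.com/cisco-ie/tdm | web/src/web/views.py | machine_id_to_8040
-- ===== SOURCE A (Python) =====
-- def machine_id_to_8040(value):
--     """Reformats the machine_id bastardized XPath to RFC 8040 compliance."""
--     xpath_elements = value.split('/')
--     module = xpath_elements[0]
--     prefixed_elements = xpath_elements[1:]
--     initial_prefix = prefixed_elements[0].split(':')[0]
--     adjusted_elements = ['']
--     for index, element in enumerate(prefixed_elements):
--         prefix, element = element.split(':')
--         if prefix == initial_prefix:
--             adjusted_elements.append('%s:%s' % (module, element))
--         else:
--             adjusted_elements.extend(prefixed_elements[index:])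
--             break
--     return machine_id_to_prefixed('/'.join(adjusted_elements))
--
-- def machine_id_to_prefixed(value):
--     """Reformats the machine_id to simplified prefixed specification."""
--     qualified_xpath = value[value.index('/'):]
--     xpath_elements = qualified_xpath.split('/')[1:]
--     running_prefix = None
--     xpath_prefixed_elements = ['']
--     for qualified_element in xpath_elements:
--         prefix, element = qualified_element.split(':')
--         if prefix == running_prefix:
--             xpath_prefixed_elements.append(element)
--         else:
--             xpath_prefixed_elements.append('%s:%s' % (prefix, element))
--             running_prefix = prefix
--     return '/'.join(xpath_prefixed_elements)
-- ===== SOURCE B (Python) =====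
-- def machine_id_to_8040(value):
--     """Reformats the machine_id bastardized XPath to RFC 8040 compliance."""
--     elements = value.split('/')
--     module = elements[0]
--     rest = elements[1:]
--     initial_prefix = rest[0].split(':')[0]
--     still_substituting = True
--     running_prefix = None
--     out = ['']
--     for element in rest:
--         prefix, name = element.split(':')
--         if still_substituting and prefix == initial_prefix:
--             qprefix = module
--         else:
--             still_substituting = False
--             qprefix = prefix
--         if qprefix == running_prefix:
--             out.append(name)
--         else:
--             out.append('%s:%s' % (qprefix, name))
--             running_prefix = qprefix
--     return '/'.join(out)
-- ===== Notes on version B (the rewrite author's own statement) =====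
-- stated objective: simpler
-- what changed: Replaces A's two-function pipeline (substitute prefixes with a break, '/'-join, re-split, then a second collapse pass) with one single loop over the split elements that carries a sticky substitution flag and a running prefix.
import Mathlib
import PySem

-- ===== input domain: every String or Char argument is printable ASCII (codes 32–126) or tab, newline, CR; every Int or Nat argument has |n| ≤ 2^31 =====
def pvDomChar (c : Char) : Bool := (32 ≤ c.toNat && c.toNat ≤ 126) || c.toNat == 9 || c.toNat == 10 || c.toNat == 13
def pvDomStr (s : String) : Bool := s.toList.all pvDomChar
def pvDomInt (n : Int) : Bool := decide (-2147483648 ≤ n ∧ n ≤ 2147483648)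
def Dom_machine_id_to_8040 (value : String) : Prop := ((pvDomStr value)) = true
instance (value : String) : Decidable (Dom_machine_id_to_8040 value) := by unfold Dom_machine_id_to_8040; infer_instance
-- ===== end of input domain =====

-- B fuses A's two-function, two-pass pipeline (substitute, '/'-join, re-split, collapse) into one
-- single loop over the elements; objective: simpler (no speed claim).

-- ===== PORT A =====
-- first loop of machine_id_to_8040: substitute the module for the initial prefix until the
-- first element with a different prefix, then keep that element and all later ones raw (break).
def pvALoop (module ip : List Char) : List (List Char) → List (List Char)
  | [] => []
  | e :: rest =>
    match PySem.Chars.splitOn e [':'] with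
    | [p, el] =>
      if p = ip then (module ++ ':' :: el) :: pvALoop module ip rest
      else e :: rest                 -- extend(prefixed_elements[index:]); break
    | _ => []                        -- Python: ValueError on unpacking (outside Pre_)

-- loop of machine_id_to_prefixed: collapse runs of equal prefixes.
def pvPLoop : Option (List Char) → List (List Char) → List (List Char)
  | _, [] => []
  | running, q :: rest =>
    match PySem.Chars.splitOn q [':'] with
    | [p, el] =>
      if some p = running then el :: pvPLoop running rest
      else (p ++ ':' :: el) :: pvPLoop (some p) rest
    | _ => []                        -- Python: ValueError on unpacking (outside Pre_)

def machine_id_to_prefixed (value : String) : String :=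
  let cs := value.toList
  -- value[value.index('/'):] ; index = find (ValueError when -1 is outside Pre_)
  let qualified := PySem.Chars.slice cs (some (PySem.Chars.find cs ['/'])) none
  let xpath_elements := PySem.List.slice (PySem.Chars.splitOn qualified ['/']) (some 1) none
  String.ofList (PySem.Chars.join ['/'] ([] :: pvPLoop none xpath_elements))

def machine_id_to_8040 (value : String) : String :=
  let xs := PySem.Chars.splitOn value.toList ['/']
  let module := xs.headD []          -- xpath_elements[0] (split is never empty)
  let prefixed := PySem.List.slice xs (some 1) none
  -- prefixed_elements[0].split(':')[0] ; headD = IndexError junk, outside Pre_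
  let ip := (PySem.Chars.splitOn (prefixed.headD []) [':']).headD []
  machine_id_to_prefixed (String.ofList (PySem.Chars.join ['/'] ([] :: pvALoop module ip prefixed)))

-- ===== PORT B =====
-- the single fused loop of Source B: sticky substitution flag + running prefix in one pass.
def pvBLoop (module ip : List Char) : Bool → Option (List Char) → List (List Char) → List (List Char)
  | _, _, [] => []
  | still, running, e :: rest =>
    match PySem.Chars.splitOn e [':'] with
    | [p, name] =>
      let hit : Bool := still && decide (p = ip)   -- still_substituting and prefix == initial_prefix
      let qp := if hit then module else p
      (if some qp = running then name else qp ++ ':' :: name)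
        :: pvBLoop module ip hit (some qp) rest
    | _ => []                        -- Python: ValueError on unpacking (outside Pre_)

def machine_id_to_8040_alt (value : String) : String :=
  let xs := PySem.Chars.splitOn value.toList ['/']
  let module := xs.headD []
  let rest := PySem.List.slice xs (some 1) none
  let ip := (PySem.Chars.splitOn (rest.headD []) [':']).headD []
  String.ofList (PySem.Chars.join ['/'] ([] :: pvBLoop module ip true none rest))

-- ===== PRECONDITION & SPEC =====
-- Pre_ is exactly where the Python A returns: at least one '/', no ':' inside the leading module
-- segment, and every later '/'-segment contains exactly one ':' (otherwise A raises
-- IndexError/ValueError).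
def Pre_machine_id_to_8040 (value : String) : Prop :=
  let xs := PySem.Chars.splitOn value.toList ['/']
  2 ≤ xs.length ∧ ':' ∉ xs.headD [] ∧ ∀ e ∈ xs.drop 1, e.count ':' = 1
instance (value : String) : Decidable (Pre_machine_id_to_8040 value) := by
  unfold Pre_machine_id_to_8040; infer_instance

def pvWitness_machine_id_to_8040 : String := "mod/a:x/a:y/b:z"

def Spec_machine_id_to_8040 (value : String) (out : String) : Prop := out = machine_id_to_8040_alt value
instance (value : String) (out : String) : Decidable (Spec_machine_id_to_8040 value out) := by
  unfold Spec_machine_id_to_8040; infer_instance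

-- ===== CLAIM (what is proved, stated in full; the proofs are below) =====
def Claim_equal_machine_id_to_8040 : Prop := ∀ (value : String), Dom_machine_id_to_8040 value → Pre_machine_id_to_8040 value → Spec_machine_id_to_8040 value (machine_id_to_8040 value)

-- ===== LEMMAS AND PROOFS =====

-- clean single-character splitter used only in the proofs
def pvSplitC (c : Char) : List Char → List (List Char)
  | [] => [[]]
  | a :: rest => if a = c then [] :: pvSplitC c rest else (pvSplitC c rest).modifyHead (a :: ·)

theorem pvSplitC_ne_nil (c : Char) (s : List Char) : pvSplitC c s ≠ [] := by
  cases s with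
  | nil => simp [pvSplitC]
  | cons a rest =>
    simp only [pvSplitC]
    split
    · simp
    · cases h : pvSplitC c rest with
      | nil => exact absurd h (pvSplitC_ne_nil c rest)
      | cons x t => simp [h]

theorem pvModifyHead_fun_id {α : Type} (l : List α) : l.modifyHead (fun x => x) = l := by
  cases l <;> rfl

theorem pvSplitOn_go_eq (c : Char) : ∀ (fuel : Nat) (l cur : List Char) (acc : List (List Char)),
    l.length < fuel →
    PySem.Chars.splitOn.go [c] fuel l cur acc
      = acc.reverse ++ (pvSplitC c l).modifyHead (cur.reverse ++ ·) := by
  intro fuel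
  induction fuel with
  | zero => intro l cur acc h; omega
  | succ f ih =>
    intro l cur acc h
    cases l with
    | nil => simp [PySem.Chars.splitOn.go, pvSplitC]
    | cons a rest =>
      by_cases hac : a = c
      · subst hac
        have : PySem.Chars.splitOn.go [a] (f+1) (a :: rest) cur acc
            = PySem.Chars.splitOn.go [a] f rest [] (cur.reverse :: acc) := by
          simp [PySem.Chars.splitOn.go, List.isPrefixOf]
        rw [this, ih rest [] (cur.reverse :: acc) (by simpa using Nat.lt_of_succ_lt_succ h)]
        simp [pvSplitC, pvModifyHead_fun_id]
      · have : PySem.Chars.splitOn.go [c] (f+1) (a :: rest) cur acc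
            = PySem.Chars.splitOn.go [c] f rest (a :: cur) acc := by
          simp [PySem.Chars.splitOn.go, List.isPrefixOf, Ne.symm hac]
        rw [this, ih rest (a :: cur) acc (by simpa using Nat.lt_of_succ_lt_succ h)]
        simp [pvSplitC, hac, List.modifyHead_modifyHead, Function.comp_def]

theorem pvSplitOn_eq (c : Char) (s : List Char) :
    PySem.Chars.splitOn s [c] = pvSplitC c s := by
  have := pvSplitOn_go_eq c (s.length + 1) s [] [] (by omega)
  simpa [PySem.Chars.splitOn, pvModifyHead_fun_id] using this

theorem pvSplitC_of_not_mem (c : Char) (s : List Char) (h : c ∉ s) : pvSplitC c s = [s] := by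
  induction s with
  | nil => rfl
  | cons a rest ih =>
    simp only [List.mem_cons, not_or] at h
    have h1 : ¬ a = c := fun hh => h.1 hh.symm
    simp [pvSplitC, h1, ih h.2]

theorem pvSplitC_cut (c : Char) (p b : List Char) (hp : c ∉ p) :
    pvSplitC c (p ++ c :: b) = p :: pvSplitC c b := by
  induction p with
  | nil => simp [pvSplitC]
  | cons a t ih =>
    simp only [List.mem_cons, not_or] at hp
    have h1 : ¬ a = c := fun hh => hp.1 hh.symm
    simp only [List.cons_append, pvSplitC, h1, if_false, ih hp.2]
    rfl

theorem pvSplitC_not_mem_of_mem (c : Char) (s e : List Char) (he : e ∈ pvSplitC c s) : c ∉ e := by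
  induction s generalizing e with
  | nil => simp [pvSplitC] at he; simp [he]
  | cons a rest ih =>
    by_cases hac : a = c
    · subst hac
      simp [pvSplitC] at he
      rcases he with he | he
      · simp [he]
      · exact ih e he
    · simp only [pvSplitC, hac, if_false] at he
      cases h : pvSplitC c rest with
      | nil => exact absurd h (pvSplitC_ne_nil c rest)
      | cons x r =>
        rw [h] at he
        simp only [List.modifyHead, List.mem_cons] at he
        rcases he with he | he
        · subst he
          have hx := ih x (by simp [h])
          have h1 : ¬ c = a := fun hh => hac hh.symm
          simp [h1, hx]
        · exact ih e (by simp [h, he])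

theorem pvCount_one_decomp (c : Char) (s : List Char) (h : s.count c = 1) :
    ∃ p n, s = p ++ c :: n ∧ c ∉ p ∧ c ∉ n := by
  induction s with
  | nil => simp at h
  | cons a rest ih =>
    by_cases hac : a = c
    · subst hac
      have : rest.count a = 0 := by simpa [List.count_cons] using h
      exact ⟨[], rest, by simp, by simp, by simpa [List.count_eq_zero] using this⟩
    · have : rest.count c = 1 := by simpa [List.count_cons, hac] using h
      obtain ⟨p, n, hs, hp, hn⟩ := ih this
      exact ⟨a :: p, n, by simp [hs], by simp [hp]; exact fun hh => hac hh.symm, hn⟩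

-- splitOn of a 1-colon element is its two halves
theorem pvSplit_two (c : Char) (p n : List Char) (hp : c ∉ p) (hn : c ∉ n) :
    PySem.Chars.splitOn (p ++ c :: n) [c] = [p, n] := by
  rw [pvSplitOn_eq, pvSplitC_cut c p n hp, pvSplitC_of_not_mem c n hn]

-- join/split round trip for a single-character separator
theorem pvSplit_join (c : Char) : ∀ (l : List (List Char)), l ≠ [] → (∀ e ∈ l, c ∉ e) →
    pvSplitC c (PySem.Chars.join [c] l) = l := by
  intro l
  induction l with
  | nil => intro h; exact absurd rfl h
  | cons x t ih =>
    intro _ hmem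
    cases t with
    | nil =>
      rw [PySem.Chars.join_singleton]
      simp [pvSplitC_of_not_mem c x (hmem x (by simp))]
    | cons y r =>
      rw [PySem.Chars.join_cons_cons]
      have hx : c ∉ x := hmem x (by simp)
      have : x ++ [c] ++ PySem.Chars.join [c] (y :: r) = x ++ c :: PySem.Chars.join [c] (y :: r) := by
        simp
      rw [this, pvSplitC_cut c x _ hx,
        ih (by simp) (fun e he => hmem e (List.mem_cons_of_mem _ he))]

theorem pvFind_slash (t : List Char) : PySem.Chars.find ('/' :: t) ['/'] = 0 := by
  have hinf : ['/'] <:+: '/' :: t := ⟨[], t, by simp⟩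
  have hnn : 0 ≤ PySem.Chars.find ('/' :: t) ['/'] := (PySem.Chars.find_nonneg_iff _ _).mpr hinf
  obtain ⟨hpre, hmin⟩ := PySem.Chars.find_spec hnn
  by_contra hne
  have hpos : 0 < (PySem.Chars.find ('/' :: t) ['/']).toNat := by omega
  exact hmin 0 hpos ⟨t, by simp⟩

-- B with the flag already off is exactly A's second-pass loop
theorem pvBLoop_false (m ip : List Char) : ∀ (l : List (List Char)) (r : Option (List Char)),
    pvBLoop m ip false r l = pvPLoop r l := by
  intro l
  induction l with
  | nil => intro r; rfl
  | cons e rest ih =>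
    intro r
    rcases hsp : PySem.Chars.splitOn e [':'] with _ | ⟨p, _ | ⟨n, _ | _⟩⟩ <;>
      simp only [pvBLoop, pvPLoop, hsp, Bool.false_and, ih] <;> try rfl
    by_cases hr : some p = r
    · rw [← hr]; simp
    · simp [hr]

-- the fused loop equals A's second pass run on A's first pass
theorem pvMain_loop (m ip : List Char) (hm : ':' ∉ m) :
    ∀ (l : List (List Char)), (∀ e ∈ l, e.count ':' = 1) → ∀ (r : Option (List Char)),
    pvPLoop r (pvALoop m ip l) = pvBLoop m ip true r l := by
  intro l
  induction l with
  | nil => intro _ r; rfl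
  | cons e rest ih =>
    intro hl r
    obtain ⟨p, n, he, hp, hn⟩ := pvCount_one_decomp ':' e (hl e (by simp))
    have hsp : PySem.Chars.splitOn e [':'] = [p, n] := by rw [he]; exact pvSplit_two ':' p n hp hn
    have ihr := ih (fun x hx => hl x (List.mem_cons_of_mem _ hx))
    by_cases hpip : p = ip
    · have hsub : PySem.Chars.splitOn (m ++ ':' :: n) [':'] = [m, n] := pvSplit_two ':' m n hm hn
      rw [show pvALoop m ip (e :: rest) = (m ++ ':' :: n) :: pvALoop m ip rest by
        simp only [pvALoop, hsp, if_pos hpip]]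
      simp only [pvPLoop, hsub, pvBLoop, hsp, hpip, decide_true, Bool.and_true, if_true, ihr]
      by_cases hr : some m = r
      · rw [← hr]; simp
      · simp [hr]
    · rw [show pvALoop m ip (e :: rest) = e :: rest by simp only [pvALoop, hsp, if_neg hpip]]
      simp only [pvPLoop, hsp, pvBLoop, hpip, decide_false, Bool.and_false, if_false,
        pvBLoop_false]
      by_cases hr : some p = r
      · rw [← hr]; simp
      · simp [hr]

-- no '/' appears in the output elements of A's first loop
theorem pvALoop_no_slash (m ip : List Char) (hm : '/' ∉ m) :
    ∀ (l : List (List Char)), (∀ e ∈ l, '/' ∉ e ∧ e.count ':' = 1) →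
    ∀ x ∈ pvALoop m ip l, '/' ∉ x := by
  intro l
  induction l with
  | nil => intro _ x hx; simp [pvALoop] at hx
  | cons e rest ih =>
    intro hl x hx
    obtain ⟨p, n, he, hp, hn⟩ := pvCount_one_decomp ':' e (hl e (by simp)).2
    have hsp : PySem.Chars.splitOn e [':'] = [p, n] := by rw [he]; exact pvSplit_two ':' p n hp hn
    by_cases hpip : p = ip
    · simp only [pvALoop, hsp, hpip, if_true] at hx
      rcases List.mem_cons.mp hx with hx | hx
      · subst hx
        have hne : '/' ∉ e := (hl e (by simp)).1
        have hnn : '/' ∉ n := fun h => hne (by rw [he]; simp [h])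
        simp only [List.mem_append, List.mem_cons, not_or]
        exact ⟨hm, by decide, hnn⟩
      · exact ih (fun y hy => hl y (List.mem_cons_of_mem _ hy)) x hx
    · simp only [pvALoop, hsp, hpip, if_false] at hx
      rcases List.mem_cons.mp hx with hx | hx
      · subst hx; exact (hl x (by simp)).1
      · exact (hl x (List.mem_cons_of_mem _ hx)).1

theorem pvALoop_ne_nil (m ip e : List Char) (rest : List (List Char)) (h : e.count ':' = 1) :
    pvALoop m ip (e :: rest) ≠ [] := by
  obtain ⟨p, n, he, hp, hn⟩ := pvCount_one_decomp ':' e h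
  have hsp : PySem.Chars.splitOn e [':'] = [p, n] := by rw [he]; exact pvSplit_two ':' p n hp hn
  by_cases hpip : p = ip <;> simp [pvALoop, hsp, hpip]

-- ===== VERDICT (by name: the statement is the Claim_ definition above) =====
theorem pvPrefixed_joined (l : List (List Char)) (hne : l ≠ [])
    (hno : ∀ x ∈ l, '/' ∉ x) :
    machine_id_to_prefixed (String.ofList (PySem.Chars.join ['/'] ([] :: l)))
      = String.ofList (PySem.Chars.join ['/'] ([] :: pvPLoop none l)) := by
  rcases l with _ | ⟨a0, arest⟩
  · exact absurd rfl hne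
  unfold machine_id_to_prefixed
  have hj : PySem.Chars.join ['/'] ([] :: a0 :: arest)
      = '/' :: PySem.Chars.join ['/'] (a0 :: arest) := by
    rw [PySem.Chars.join_cons_cons]; simp
  have hno' : ∀ x ∈ ([] :: a0 :: arest : List (List Char)), '/' ∉ x := by
    intro x hx
    rcases List.mem_cons.mp hx with hx | hx
    · subst hx; simp
    · exact hno x hx
  simp only [String.toList_ofList, hj, pvFind_slash, PySem.Chars.slice_eq_listSlice]
  simp only [PySem.List.slice_from _ (le_refl (0:Int)), Int.toNat_zero, List.drop_zero,
    PySem.List.slice_from_one]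
  rw [← hj, pvSplitOn_eq, pvSplit_join '/' ([] :: a0 :: arest) (by simp) hno', List.tail_cons]

theorem machine_id_to_8040_spec : Claim_equal_machine_id_to_8040 := by
  intro value _ hpre
  unfold Pre_machine_id_to_8040 at hpre
  obtain ⟨hlen, hmod, hcnt⟩ := hpre
  unfold Spec_machine_id_to_8040 machine_id_to_8040 machine_id_to_8040_alt
  rcases hX : PySem.Chars.splitOn value.toList ['/'] with _ | ⟨x0, _ | ⟨x1, xt⟩⟩ <;>
    rw [hX] at hlen hmod hcnt <;> try simp at hlen
  simp only [hX, List.headD_cons, PySem.List.slice_from_one, List.tail_cons,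
    List.drop_succ_cons, List.drop_zero] at hmod hcnt ⊢
  set ip := (PySem.Chars.splitOn x1 [':']).headD [] with hip
  have hmemX : ∀ y, y ∈ (x0 :: x1 :: xt) → '/' ∉ y := by
    intro y hy
    apply pvSplitC_not_mem_of_mem '/' value.toList
    rw [← pvSplitOn_eq, hX]; exact hy
  have hcc : ∀ e ∈ x1 :: xt, '/' ∉ e ∧ e.count ':' = 1 :=
    fun e he => ⟨hmemX e (List.mem_cons_of_mem _ he), hcnt e he⟩
  rw [pvPrefixed_joined (pvALoop x0 ip (x1 :: xt))
      (pvALoop_ne_nil x0 ip x1 xt (hcnt x1 (by simp)))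
      (pvALoop_no_slash x0 ip (hmemX x0 (by simp)) (x1 :: xt) hcc),
    pvMain_loop x0 ip hmod (x1 :: xt) (fun e he => (hcc e he).2) none]
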